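-- pv_equiv track=rewrite | github.com/takanotaiga/cosmos-transfer2.5 | cosmos_transfer2/_src/predict2_multiview/datasets/data_sources/data_registration.py | _get_contiguous_view_indices_options
-- ===== SOURCE A (Python) =====
-- def _get_contiguous_view_indices_options(sample_n_views: int, ref_cam_view_idx: int, n_cameras: int):
--     view_indices_options = []
--     for i in range(n_cameras):
--         view_indices_option_i = [i]
--         for j in range(1, sample_n_views):
--             view_indices_option_i.append((i + j) % n_cameras)
--         if ref_cam_view_idx < 0 or ref_cam_view_idx in view_indices_option_i:
--             view_indices_options.append(view_indices_option_i)
--     return view_indices_options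
-- ===== SOURCE B (Python) =====
-- def _get_contiguous_view_indices_options(sample_n_views: int, ref_cam_view_idx: int, n_cameras: int):
--     s, ref, n = sample_n_views, ref_cam_view_idx, n_cameras
--     if n <= 0:
--         return []
--     if ref < 0:
--         starts = list(range(n))
--     else:
--         # i's window contains ref iff ref is a real index and ref is at most
--         # max(s,1)-1 cyclic steps after i
--         starts = [i for i in range(n) if ref < n and (ref - i) % n < max(s, 1)]
--     return [[i] + [(i + j) % n for j in range(1, s)] for i in starts]
-- ===== Notes on version B (the rewrite author's own statement) =====
-- stated objective: alternative
-- what changed: Replaces A's per-start window scan for the reference camera by an O(1) modular-arithmetic test ((ref-i) % n < max(s,1)) selecting the qualifying start indices first, so windows are built only for kept starts.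
import Mathlib
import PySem

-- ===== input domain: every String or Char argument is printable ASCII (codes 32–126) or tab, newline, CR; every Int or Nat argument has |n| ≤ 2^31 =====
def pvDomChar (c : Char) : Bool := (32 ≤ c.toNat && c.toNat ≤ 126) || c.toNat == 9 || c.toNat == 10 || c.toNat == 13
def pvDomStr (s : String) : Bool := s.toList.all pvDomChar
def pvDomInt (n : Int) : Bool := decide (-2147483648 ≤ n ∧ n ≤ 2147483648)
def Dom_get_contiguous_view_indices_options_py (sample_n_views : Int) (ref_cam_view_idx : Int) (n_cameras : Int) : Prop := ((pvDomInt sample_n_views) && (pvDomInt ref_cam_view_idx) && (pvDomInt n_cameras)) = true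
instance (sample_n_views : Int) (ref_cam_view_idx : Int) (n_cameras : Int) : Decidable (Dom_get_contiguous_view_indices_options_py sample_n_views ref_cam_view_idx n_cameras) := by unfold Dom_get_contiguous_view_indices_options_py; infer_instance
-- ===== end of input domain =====

-- B replaces A's per-start window scan for the reference camera by an O(1) modular test
-- selecting the qualifying starts first; windows are built only for kept starts (objective: alternative).

-- ===== PORT A =====
def get_contiguous_view_indices_options_py (sample_n_views : Int) (ref_cam_view_idx : Int) (n_cameras : Int) : List (List Int) :=
  (PySem.List.pyRange 0 n_cameras 1).foldl (fun acc i =>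
    let w := (PySem.List.pyRange 1 sample_n_views 1).foldl
      (fun wi j => wi ++ [PySem.Int.mod (i + j) n_cameras]) [i]
    if decide (ref_cam_view_idx < 0) || w.contains ref_cam_view_idx then acc ++ [w] else acc) []

-- ===== PORT B =====
def get_contiguous_view_indices_options_py_alt (sample_n_views : Int) (ref_cam_view_idx : Int) (n_cameras : Int) : List (List Int) :=
  if n_cameras ≤ 0 then []
  else
    let starts :=
      if ref_cam_view_idx < 0 then PySem.List.pyRange 0 n_cameras 1
      else (PySem.List.pyRange 0 n_cameras 1).filter
        (fun i => decide (ref_cam_view_idx < n_cameras) &&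
          decide (PySem.Int.mod (ref_cam_view_idx - i) n_cameras < max sample_n_views 1))
    starts.map (fun i =>
      [i] ++ (PySem.List.pyRange 1 sample_n_views 1).map (fun j => PySem.Int.mod (i + j) n_cameras))

-- ===== PRECONDITION & SPEC =====
def Spec_get_contiguous_view_indices_options_py (sample_n_views : Int) (ref_cam_view_idx : Int) (n_cameras : Int) (out : List (List Int)) : Prop := out = get_contiguous_view_indices_options_py_alt sample_n_views ref_cam_view_idx n_cameras
instance (sample_n_views : Int) (ref_cam_view_idx : Int) (n_cameras : Int) (out : List (List Int)) : Decidable (Spec_get_contiguous_view_indices_options_py sample_n_views ref_cam_view_idx n_cameras out) := by unfold Spec_get_contiguous_view_indices_options_py; infer_instance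

-- ===== CLAIM (what is proved, stated in full; the proofs are below) =====
def Claim_equal_get_contiguous_view_indices_options_py : Prop := ∀ (sample_n_views : Int) (ref_cam_view_idx : Int) (n_cameras : Int), Dom_get_contiguous_view_indices_options_py sample_n_views ref_cam_view_idx n_cameras → Spec_get_contiguous_view_indices_options_py sample_n_views ref_cam_view_idx n_cameras (get_contiguous_view_indices_options_py sample_n_views ref_cam_view_idx n_cameras)

-- ===== LEMMAS AND PROOFS =====

-- (i + (ref - i) % n) % n = ref for in-range ref
lemma pv_add_emod_sub (i ref n : Int) (hn : 0 < n) (h0 : 0 ≤ ref) (h1 : ref < n) :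
    (i + (ref - i) % n) % n = ref := by
  rw [Int.add_emod i ((ref - i) % n) n, Int.emod_emod_of_dvd _ dvd_rfl, ← Int.add_emod]
  have : i + (ref - i) = ref := by ring
  rw [this, Int.emod_eq_of_lt h0 h1]

lemma pv_sub_emod_emod (a i n : Int) : (a % n - i) % n = (a - i) % n := by
  rw [Int.sub_emod (a % n) i n, Int.emod_emod_of_dvd _ dvd_rfl, ← Int.sub_emod]

lemma pv_emod_le_self (j n : Int) (hj : 0 ≤ j) (hn : 0 < n) : j % n ≤ j := by
  by_cases h : j < n
  · rw [Int.emod_eq_of_lt hj h]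
  · have := Int.emod_lt_of_pos j hn
    omega

-- membership in the window starting at i, for valid start index and 0 ≤ ref
lemma pv_mem_win_iff (s ref n i : Int) (hn : 0 < n) (hi0 : 0 ≤ i) (hin : i < n) (hr : 0 ≤ ref) :
    ref ∈ ([i] ++ (PySem.List.pyRange 1 s 1).map (fun j => PySem.Int.mod (i + j) n)) ↔
      (ref < n ∧ PySem.Int.mod (ref - i) n < max s 1) := by
  simp only [PySem.Int.mod_eq_emod_of_pos hn, List.mem_append, List.mem_singleton, List.mem_map,
    PySem.List.mem_pyRange_one]
  constructor
  · rintro (rfl | ⟨j, ⟨hj1, hjs⟩, rfl⟩)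
    · refine ⟨hin, ?_⟩
      simp only [sub_self, Int.zero_emod]
      have := le_max_right s 1; omega
    · refine ⟨Int.emod_lt_of_pos _ hn, ?_⟩
      rw [pv_sub_emod_emod]
      have : (i + j - i) % n = j % n := by ring_nf
      rw [this]
      have h1 := pv_emod_le_self j n (by omega) hn
      have : max s 1 = s := by omega
      omega
  · rintro ⟨hrn, ht⟩
    set t := (ref - i) % n with htdef
    have ht0 : 0 ≤ t := Int.emod_nonneg _ (by omega)
    have hkey : (i + t) % n = ref := pv_add_emod_sub i ref n hn hr hrn
    by_cases h0 : t = 0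
    · left
      have : (i + t) % n = i := by
        rw [h0, add_zero, Int.emod_eq_of_lt hi0 hin]
      omega
    · right
      refine ⟨t, ⟨by omega, ?_⟩, hkey⟩
      omega

-- A in filter/map form
lemma pv_A_eq (s ref n : Int) :
    get_contiguous_view_indices_options_py s ref n =
      ((PySem.List.pyRange 0 n 1).filter (fun i => decide (ref < 0) ||
          ([i] ++ (PySem.List.pyRange 1 s 1).map (fun j => PySem.Int.mod (i + j) n)).contains ref)).map
        (fun i => [i] ++ (PySem.List.pyRange 1 s 1).map (fun j => PySem.Int.mod (i + j) n)) := by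
  unfold get_contiguous_view_indices_options_py
  simp only [PySem.List.foldl_append_singleton_eq_map]
  rw [PySem.List.foldl_append_if]
  simp

-- ===== VERDICT (by name: the statement is the Claim_ definition above) =====
theorem get_contiguous_view_indices_options_py_spec : Claim_equal_get_contiguous_view_indices_options_py := by
  intro s ref n _
  unfold Spec_get_contiguous_view_indices_options_py get_contiguous_view_indices_options_py_alt
  rw [pv_A_eq]
  by_cases hn : n ≤ 0
  · simp [hn, PySem.List.pyRange_one_eq_nil (by omega : (n : Int) ≤ 0)]
  · rw [not_le] at hn
    rw [if_neg (by omega)]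
    by_cases hr : ref < 0
    · rw [if_pos hr]
      congr 1
      rw [List.filter_eq_self]
      intro i _
      simp [hr]
    · rw [if_neg hr]
      congr 1
      apply List.filter_congr
      intro i hi
      rw [PySem.List.mem_pyRange_one] at hi
      simp only [decide_eq_false hr, Bool.false_or]
      have hiff := pv_mem_win_iff s ref n i hn hi.1 hi.2 (by omega)
      simp only [List.contains_eq_mem, hiff, Bool.decide_and]
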